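-- pv_equiv track=rewrite | github.com/dmzoneill/redhat-ai-workflow | tool_modules/aa_workflow/src/skill_engine.py | _get_module_for_tool
-- ===== SOURCE A (Python) =====
-- def _get_module_for_tool(tool_name: str) -> str | None:
--     """Map tool name to module name based on prefix."""
--     module_prefixes = {
--         "git_": "git",
--         "jira_": "jira",
--         "gitlab_": "gitlab",
--         "slack_": "slack",
--         "kubectl_": "k8s",
--         "k8s_": "k8s",
--         "prometheus_": "prometheus",
--         "alertmanager_": "alertmanager",
--         "kibana_": "kibana",
--         "konflux_": "konflux",
--         "tkn_": "konflux",
--         "bonfire_": "bonfire",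
--         "quay_": "quay",
--         "appinterface_": "appinterface",
--         # Lint module tools (developer-specific)
--         "lint_": "lint",
--         "test_": "lint",
--         "security_": "lint",
--         "precommit_": "lint",
--         # Dev-workflow module tools (developer-specific)
--         "workflow_": "dev_workflow",
--         # Core workflow module tools (always loaded)
--         "memory_": "workflow",
--         "persona_": "workflow",
--         "skill_": "workflow",
--         "session_": "workflow",
--         "tool_": "workflow",
--         "vpn_": "workflow",
--         "kube_": "workflow",
--         "debug_": "workflow",
--     }
--
--     for prefix, mod in module_prefixes.items():
--         if tool_name.startswith(prefix):
--             return mod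
--     return None
-- ===== SOURCE B (Python) =====
-- def _get_module_for_tool(tool_name: str) -> str | None:
--     """Map tool name to module name based on prefix."""
--     # Every registered prefix ends at its only underscore, so the only
--     # prefix a name can start with is its segment up to the first "_".
--     word, sep, _rest = tool_name.partition("_")
--     if not sep:
--         return None
--     if word in ("kubectl", "k8s"):
--         return "k8s"
--     if word in ("konflux", "tkn"):
--         return "konflux"
--     if word in ("lint", "test", "security", "precommit"):
--         return "lint"
--     if word == "workflow":
--         return "dev_workflow"
--     if word in ("memory", "persona", "skill", "session",
--                 "tool", "vpn", "kube", "debug"):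
--         return "workflow"
--     if word in ("git", "jira", "gitlab", "slack", "prometheus", "alertmanager",
--                 "kibana", "bonfire", "quay", "appinterface"):
--         return word
--     return None
-- ===== Notes on version B (the rewrite author's own statement) =====
-- stated objective: alternative
-- what changed: Replaces the linear scan of startswith tests over the 27-entry prefix dict by splitting the name at its first underscore (str.partition) and classifying the leading word with grouped equality/membership tests (no prefix table at all); correct because every registered prefix ends at its only underscore.
import Mathlib
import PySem

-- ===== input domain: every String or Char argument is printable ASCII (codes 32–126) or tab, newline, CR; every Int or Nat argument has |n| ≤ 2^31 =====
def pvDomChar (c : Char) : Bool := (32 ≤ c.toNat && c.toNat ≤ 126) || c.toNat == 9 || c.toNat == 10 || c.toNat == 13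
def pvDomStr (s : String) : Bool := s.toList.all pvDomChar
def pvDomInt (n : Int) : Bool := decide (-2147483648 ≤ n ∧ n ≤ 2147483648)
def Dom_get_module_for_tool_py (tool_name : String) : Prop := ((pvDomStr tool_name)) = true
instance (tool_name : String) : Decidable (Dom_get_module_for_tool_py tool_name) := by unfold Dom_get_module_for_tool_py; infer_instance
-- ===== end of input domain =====

-- B replaces A's linear scan of startswith tests over the prefix table by splitting the
-- name at its first underscore and classifying the leading word with grouped comparisons.

-- ===== PORT A =====
-- the prefix → module dict literal of A, in insertion order
def modulePrefixes : List (String × String) :=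
  [("git_", "git"), ("jira_", "jira"), ("gitlab_", "gitlab"), ("slack_", "slack"),
   ("kubectl_", "k8s"), ("k8s_", "k8s"), ("prometheus_", "prometheus"),
   ("alertmanager_", "alertmanager"), ("kibana_", "kibana"), ("konflux_", "konflux"),
   ("tkn_", "konflux"), ("bonfire_", "bonfire"), ("quay_", "quay"),
   ("appinterface_", "appinterface"), ("lint_", "lint"), ("test_", "lint"),
   ("security_", "lint"), ("precommit_", "lint"), ("workflow_", "dev_workflow"),
   ("memory_", "workflow"), ("persona_", "workflow"), ("skill_", "workflow"),
   ("session_", "workflow"), ("tool_", "workflow"), ("vpn_", "workflow"),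
   ("kube_", "workflow"), ("debug_", "workflow")]

-- 'for prefix, mod in module_prefixes.items(): if tool_name.startswith(prefix): return mod'
def aScan (ps : List (String × String)) (tool_name : String) : Option String :=
  match ps with
  | [] => none
  | (p, m) :: rest =>
    if PySem.Str.startswith tool_name p then some m else aScan rest tool_name

def get_module_for_tool_py (tool_name : String) : Option String :=
  aScan modulePrefixes tool_name

-- ===== PORT B =====
-- tool_name.partition('_') restricted to what B uses: the word before the first '_',
-- or none when there is no '_' (exact hand port of that behaviour of str.partition)
def wordBeforeUnderscore (cs : List Char) : Option (List Char) :=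
  match cs with
  | [] => none
  | c :: rest => if c = '_' then some [] else (wordBeforeUnderscore rest).map (c :: ·)

-- the chain of grouped membership tests of B
def moduleForWord (w : String) : Option String :=
  if w = "kubectl" ∨ w = "k8s" then some "k8s"
  else if w = "konflux" ∨ w = "tkn" then some "konflux"
  else if w = "lint" ∨ w = "test" ∨ w = "security" ∨ w = "precommit" then some "lint"
  else if w = "workflow" then some "dev_workflow"
  else if w ∈ (["memory", "persona", "skill", "session", "tool", "vpn", "kube", "debug"] : List String) then some "workflow"
  else if w ∈ (["git", "jira", "gitlab", "slack", "prometheus", "alertmanager", "kibana", "bonfire", "quay", "appinterface"] : List String) then some w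
  else none

def get_module_for_tool_py_alt (tool_name : String) : Option String :=
  match wordBeforeUnderscore tool_name.toList with
  | none => none
  | some w => moduleForWord (String.ofList w)

-- ===== PRECONDITION & SPEC =====
def Spec_get_module_for_tool_py (tool_name : String) (out : Option String) : Prop := out = get_module_for_tool_py_alt tool_name
instance (tool_name : String) (out : Option String) : Decidable (Spec_get_module_for_tool_py tool_name out) := by unfold Spec_get_module_for_tool_py; infer_instance

-- ===== CLAIM (what is proved, stated in full; the proofs are below) =====
def Claim_equal_get_module_for_tool_py : Prop := ∀ (tool_name : String), Dom_get_module_for_tool_py tool_name → Spec_get_module_for_tool_py tool_name (get_module_for_tool_py tool_name)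

-- ===== LEMMAS AND PROOFS =====

lemma wordBefore_none_iff (cs : List Char) : wordBeforeUnderscore cs = none ↔ '_' ∉ cs := by
  induction cs with
  | nil => simp [wordBeforeUnderscore]
  | cons c rest ih =>
    by_cases h : c = '_'
    · subst h; simp [wordBeforeUnderscore]
    · have h' : ¬ '_' = c := fun e => h e.symm
      simp only [wordBeforeUnderscore, if_neg h, Option.map_eq_none_iff, ih, List.mem_cons]
      tauto

lemma wordBefore_some (cs u : List Char) (h : wordBeforeUnderscore cs = some u) :
    '_' ∉ u ∧ ∃ v, cs = u ++ '_' :: v := by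
  induction cs generalizing u with
  | nil => simp [wordBeforeUnderscore] at h
  | cons c rest ih =>
    by_cases hc : c = '_'
    · subst hc
      simp [wordBeforeUnderscore] at h
      subst h
      exact ⟨by simp, rest, rfl⟩
    · simp [wordBeforeUnderscore, hc, Option.map_eq_some_iff] at h
      obtain ⟨u', hu', rfl⟩ := h
      obtain ⟨h1, v, hv⟩ := ih u' hu'
      refine ⟨?_, v, by simp [hv]⟩
      simp only [List.mem_cons, not_or]
      exact ⟨fun e => hc e.symm, h1⟩

-- if no key of ps starts the name (each key contains '_', the name has none), the scan yields none
lemma aScan_eq_none (ps : List (String × String)) (t : String)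
    (hps : ∀ pm ∈ ps, '_' ∈ pm.1.toList) (ht : '_' ∉ t.toList) :
    aScan ps t = none := by
  induction ps with
  | nil => rfl
  | cons pm rest ih =>
    obtain ⟨p, m⟩ := pm
    have hpre : ¬ PySem.Str.startswith t p = true := by
      rw [PySem.Str.startswith_eq, PySem.Chars.startswith_iff]
      intro hp
      exact ht (hp.subset (hps (p, m) (by simp)))
    simp only [aScan, if_neg hpre]
    exact ih (fun q hq => hps q (by simp [hq]))

-- a word ending in its only underscore is a prefix of u ++ '_' :: v ('_' ∉ u) iff the word is u
lemma word_underscore_prefix (w u v : List Char) (hw : '_' ∉ w) (hu : '_' ∉ u) :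
    (w ++ ['_']) <+: (u ++ '_' :: v) ↔ w = u := by
  induction w generalizing u with
  | nil =>
    cases u with
    | nil => simp
    | cons c u' =>
      simp only [List.nil_append, List.cons_append, List.cons_prefix_cons]
      constructor
      · rintro ⟨h, -⟩; subst h; simp at hu
      · intro h; simp at h
  | cons a w' ih =>
    cases u with
    | nil =>
      simp only [List.cons_append, List.nil_append, List.cons_prefix_cons]
      constructor
      · rintro ⟨h, -⟩; subst h; simp at hw
      · intro h; simp at h
    | cons c u' =>
      simp only [List.cons_append, List.cons_prefix_cons, List.cons.injEq]
      have hw' : '_' ∉ w' := fun h => hw (List.mem_cons_of_mem _ h)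
      have hu' : '_' ∉ u' := fun h => hu (List.mem_cons_of_mem _ h)
      rw [ih u' hw' hu']

-- with the name split at its first underscore, the scan equals dict lookup of the word key
lemma aScan_eq_get (ps : List (String × String)) (t key : String) (u v : List Char)
    (hsplit : t.toList = u ++ '_' :: v) (hu : '_' ∉ u) (hkey : key.toList = u ++ ['_'])
    (hps : ∀ pm ∈ ps, pm.1.toList.getLast? = some '_' ∧ '_' ∉ pm.1.toList.dropLast) :
    aScan ps t = (PySem.Dict.mk ps).get? key := by
  induction ps with
  | nil => rfl
  | cons pm rest ih =>
    obtain ⟨p, m⟩ := pm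
    obtain ⟨hlast, hw⟩ := hps (p, m) (by simp)
    set w := p.toList.dropLast with hwdef
    have hwp : p.toList = w ++ ['_'] := by
      have hne : p.toList ≠ [] := by rintro hnil; rw [hnil] at hlast; simp at hlast
      have h2 := List.getLast?_eq_some_getLast (l := p.toList) hne
      rw [h2] at hlast
      simp at hlast
      have h3 := List.dropLast_concat_getLast (l := p.toList) hne
      rw [hlast] at h3
      exact h3.symm
    have hcond : PySem.Str.startswith t p = (p == key) := by
      by_cases hc : w = u
      · have hpk : p = key := by
          apply String.ext; rw [hwp, hkey, hc]
        simp only [hpk, beq_self_eq_true]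
        rw [PySem.Str.startswith_eq, PySem.Chars.startswith_iff, hkey, hsplit]
        exact (word_underscore_prefix u u v (hc ▸ hw) hu).mpr rfl
      · have hpk : ¬ p = key := by
          intro h
          apply hc
          have := congrArg String.toList h
          rw [hwp, hkey] at this
          exact List.append_inj_left' this (by simp)
        have : (p == key) = false := beq_eq_false_iff_ne.mpr hpk
        rw [this, PySem.Str.startswith_eq]
        rw [← Bool.not_eq_true]
        rw [PySem.Chars.startswith_iff, hwp, hsplit]
        exact fun h => hc ((word_underscore_prefix w u v hw hu).mp h)
    rw [PySem.Dict.get?_mk_cons]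
    simp only [aScan, hcond]
    by_cases h : (p == key) = true
    · simp [h]
    · simp only [Bool.not_eq_true] at h
      simp only [h, Bool.false_eq_true, if_false]
      exact ih (fun q hq => hps q (by simp [hq]))

-- the dict lookup of the word key agrees with B's grouped classification of the word
lemma dict_eq_moduleForWord (u : List Char) (hu : '_' ∉ u) :
    (PySem.Dict.mk modulePrefixes).get? (String.ofList (u ++ ['_'])) = moduleForWord (String.ofList u) := by
  by_cases h1 : u = "git".toList
  · subst h1; decide
  by_cases h2 : u = "jira".toList
  · subst h2; decide
  by_cases h3 : u = "gitlab".toList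
  · subst h3; decide
  by_cases h4 : u = "slack".toList
  · subst h4; decide
  by_cases h5 : u = "kubectl".toList
  · subst h5; decide
  by_cases h6 : u = "k8s".toList
  · subst h6; decide
  by_cases h7 : u = "prometheus".toList
  · subst h7; decide
  by_cases h8 : u = "alertmanager".toList
  · subst h8; decide
  by_cases h9 : u = "kibana".toList
  · subst h9; decide
  by_cases h10 : u = "konflux".toList
  · subst h10; decide
  by_cases h11 : u = "tkn".toList
  · subst h11; decide
  by_cases h12 : u = "bonfire".toList
  · subst h12; decide
  by_cases h13 : u = "quay".toList
  · subst h13; decide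
  by_cases h14 : u = "appinterface".toList
  · subst h14; decide
  by_cases h15 : u = "lint".toList
  · subst h15; decide
  by_cases h16 : u = "test".toList
  · subst h16; decide
  by_cases h17 : u = "security".toList
  · subst h17; decide
  by_cases h18 : u = "precommit".toList
  · subst h18; decide
  by_cases h19 : u = "workflow".toList
  · subst h19; decide
  by_cases h20 : u = "memory".toList
  · subst h20; decide
  by_cases h21 : u = "persona".toList
  · subst h21; decide
  by_cases h22 : u = "skill".toList
  · subst h22; decide
  by_cases h23 : u = "session".toList
  · subst h23; decide
  by_cases h24 : u = "tool".toList
  · subst h24; decide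
  by_cases h25 : u = "vpn".toList
  · subst h25; decide
  by_cases h26 : u = "kube".toList
  · subst h26; decide
  by_cases h27 : u = "debug".toList
  · subst h27; decide
  have key : ∀ (p w : String), p.toList = w.toList ++ ['_'] → ¬ u = w.toList →
      (p == String.ofList (u ++ ['_'])) = false := by
    intro p w hp hne
    apply beq_eq_false_iff_ne.mpr
    intro he
    apply hne
    have h := congrArg String.toList he
    rw [hp] at h; simp at h
    exact h.symm
  have e : ∀ (s : String), (String.ofList u = s) ↔ (u = s.toList) :=
    fun s => ⟨fun he => by rw [← he]; simp, fun he => by rw [he]; simp⟩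
  simp only [modulePrefixes, PySem.Dict.get?_mk_cons,
    key "git_" "git" (by decide) h1,
    key "jira_" "jira" (by decide) h2,
    key "gitlab_" "gitlab" (by decide) h3,
    key "slack_" "slack" (by decide) h4,
    key "kubectl_" "kubectl" (by decide) h5,
    key "k8s_" "k8s" (by decide) h6,
    key "prometheus_" "prometheus" (by decide) h7,
    key "alertmanager_" "alertmanager" (by decide) h8,
    key "kibana_" "kibana" (by decide) h9,
    key "konflux_" "konflux" (by decide) h10,
    key "tkn_" "tkn" (by decide) h11,
    key "bonfire_" "bonfire" (by decide) h12,
    key "quay_" "quay" (by decide) h13,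
    key "appinterface_" "appinterface" (by decide) h14,
    key "lint_" "lint" (by decide) h15,
    key "test_" "test" (by decide) h16,
    key "security_" "security" (by decide) h17,
    key "precommit_" "precommit" (by decide) h18,
    key "workflow_" "workflow" (by decide) h19,
    key "memory_" "memory" (by decide) h20,
    key "persona_" "persona" (by decide) h21,
    key "skill_" "skill" (by decide) h22,
    key "session_" "session" (by decide) h23,
    key "tool_" "tool" (by decide) h24,
    key "vpn_" "vpn" (by decide) h25,
    key "kube_" "kube" (by decide) h26,
    key "debug_" "debug" (by decide) h27,
    Bool.false_eq_true, if_false]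
  simp at h1 h2 h3 h4 h5 h6 h7 h8 h9 h10 h11 h12 h13 h14 h15 h16 h17 h18 h19 h20 h21 h22 h23 h24 h25 h26 h27
  simp [moduleForWord, PySem.Dict.get?, e, h1, h2, h3, h4, h5, h6, h7, h8, h9, h10, h11, h12, h13, h14, h15, h16, h17, h18, h19, h20, h21, h22, h23, h24, h25, h26, h27]

-- ===== VERDICT (by name: the statement is the Claim_ definition above) =====
theorem get_module_for_tool_py_spec : Claim_equal_get_module_for_tool_py := by
  intro t _
  show get_module_for_tool_py t = get_module_for_tool_py_alt t
  unfold get_module_for_tool_py get_module_for_tool_py_alt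
  cases hsplit : wordBeforeUnderscore t.toList with
  | none =>
    exact aScan_eq_none modulePrefixes t (by decide) ((wordBefore_none_iff _).mp hsplit)
  | some u =>
    obtain ⟨hu, v, hv⟩ := wordBefore_some _ _ hsplit
    rw [aScan_eq_get modulePrefixes t (String.ofList (u ++ ['_'])) u v hv hu (by simp) (by decide)]
    exact dict_eq_moduleForWord u hu
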